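-- pv_equiv track=rewrite | github.com/TakaIshikawa/blueprint | src/blueprint/task_notification_preference_readiness.py | _detect_missing_safeguards
-- ===== SOURCE A (Python) =====
-- from typing import Any, Iterable, Literal, Mapping, TypeVar
--
-- NotificationPreferenceSignal = Literal[
--     "notification_preference",
--     "subscription",
--     "unsubscribe",
--     "mute_setting",
--     "digest_cadence",
--     "channel_preference",
--     "preference_center",
-- ]
--
-- NotificationPreferenceReadinessCategory = Literal[
--     "unsubscribe_flow",
--     "preference_persistence",
--     "default_state",
--     "channel_settings",
--     "audit_trail",
--     "migration_handling",
--     "denied_channel_tests",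
-- ]
--
-- _CATEGORY_ORDER: tuple[NotificationPreferenceReadinessCategory, ...] = (
--     "unsubscribe_flow",
--     "preference_persistence",
--     "default_state",
--     "channel_settings",
--     "audit_trail",
--     "migration_handling",
--     "denied_channel_tests",
-- )
--
-- def _detect_missing_safeguards(
--     signals: tuple[NotificationPreferenceSignal, ...],
--     present_safeguards: tuple[NotificationPreferenceReadinessCategory, ...],
-- ) -> tuple[NotificationPreferenceReadinessCategory, ...]:
--     present = set(present_safeguards)
--     required: set[NotificationPreferenceReadinessCategory] = set()
--
--     if "unsubscribe" in signals or "subscription" in signals: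
--         required.update(
--             {
--                 "unsubscribe_flow",
--                 "preference_persistence",
--                 "default_state",
--                 "denied_channel_tests",
--             }
--         )
--
--     if "channel_preference" in signals or "digest_cadence" in signals:
--         required.add("channel_settings")
--
--     if "preference_center" in signals:
--         required.update(
--             {
--                 "unsubscribe_flow",
--                 "preference_persistence",
--                 "channel_settings",
--                 "audit_trail",
--             }
--         )
--
--     if "mute_setting" in signals:
--         required.update(
--             {
--                 "preference_persistence",
--                 "denied_channel_tests",
--             }
--         )
--
--     return tuple(category for category in _CATEGORY_ORDER if category in required - present)
-- ===== SOURCE B (Python) =====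
-- _CATEGORY_ORDER = (
--     "unsubscribe_flow",
--     "preference_persistence",
--     "default_state",
--     "channel_settings",
--     "audit_trail",
--     "migration_handling",
--     "denied_channel_tests",
-- )
--
-- # Direct signal -> categories map; B iterates over the SIGNALS (not over fixed
-- # membership conditions), unions the mapped categories, removes the present
-- # ones, and sorts the remainder by canonical rank.
-- _SIGNAL_CATEGORIES = {
--     "unsubscribe": ("unsubscribe_flow", "preference_persistence", "default_state", "denied_channel_tests"),
--     "subscription": ("unsubscribe_flow", "preference_persistence", "default_state", "denied_channel_tests"),
--     "channel_preference": ("channel_settings",),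
--     "digest_cadence": ("channel_settings",),
--     "preference_center": ("unsubscribe_flow", "preference_persistence", "channel_settings", "audit_trail"),
--     "mute_setting": ("preference_persistence", "denied_channel_tests"),
-- }
--
-- _RANK = {category: index for index, category in enumerate(_CATEGORY_ORDER)}
--
--
-- def _detect_missing_safeguards(signals, present_safeguards):
--     missing = set()
--     for sig in signals:
--         missing.update(_SIGNAL_CATEGORIES.get(sig, ()))
--     missing.difference_update(present_safeguards)
--     return tuple(sorted(missing, key=_RANK.__getitem__))
-- ===== Notes on version B (the rewrite author's own statement) =====
-- stated objective: alternative
-- what changed: B traverses the signals list through a signal->categories map, accumulating the union of mapped categories, then subtracts the present safeguards and sorts the remainder by canonical rank, instead of A's four fixed membership tests over signals followed by filtering the canonical category tuple.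
import Mathlib
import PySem

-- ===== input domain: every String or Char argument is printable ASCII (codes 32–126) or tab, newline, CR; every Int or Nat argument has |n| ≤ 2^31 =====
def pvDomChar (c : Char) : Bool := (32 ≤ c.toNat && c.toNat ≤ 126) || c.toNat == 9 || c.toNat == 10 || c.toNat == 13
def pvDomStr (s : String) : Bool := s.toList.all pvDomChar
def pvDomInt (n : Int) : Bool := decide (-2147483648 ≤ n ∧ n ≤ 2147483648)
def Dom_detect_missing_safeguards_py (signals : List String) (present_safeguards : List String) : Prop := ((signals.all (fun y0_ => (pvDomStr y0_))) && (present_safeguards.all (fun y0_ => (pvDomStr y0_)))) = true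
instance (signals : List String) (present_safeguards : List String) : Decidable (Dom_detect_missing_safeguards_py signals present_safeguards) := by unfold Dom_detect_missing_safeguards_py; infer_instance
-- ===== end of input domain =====

-- B traverses the SIGNALS through a signal→categories map (instead of A's four fixed
-- membership conditions) and sorts the missing set by canonical rank (objective: alternative).

def pvCategoryOrder : List String :=
  ["unsubscribe_flow", "preference_persistence", "default_state", "channel_settings",
   "audit_trail", "migration_handling", "denied_channel_tests"]

-- ===== PORT A =====
def detect_missing_safeguards_py (signals : List String) (present_safeguards : List String) : List String :=
  let present : PySem.Set String := PySem.Set.ofList present_safeguards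
  let required : PySem.Set String := PySem.Set.empty
  let required := if signals.contains "unsubscribe" || signals.contains "subscription" then
      PySem.Set.update required ["unsubscribe_flow", "preference_persistence", "default_state", "denied_channel_tests"]
    else required
  let required := if signals.contains "channel_preference" || signals.contains "digest_cadence" then
      PySem.Set.add required "channel_settings"
    else required
  let required := if signals.contains "preference_center" then
      PySem.Set.update required ["unsubscribe_flow", "preference_persistence", "channel_settings", "audit_trail"]
    else required
  let required := if signals.contains "mute_setting" then
      PySem.Set.update required ["preference_persistence", "denied_channel_tests"]
    else required
  pvCategoryOrder.filter (fun c => PySem.Set.contains (PySem.Set.diff required present) c)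

-- ===== PORT B =====
def pvSignalCategories : List (String × List String) :=
  [("unsubscribe", ["unsubscribe_flow", "preference_persistence", "default_state", "denied_channel_tests"]),
   ("subscription", ["unsubscribe_flow", "preference_persistence", "default_state", "denied_channel_tests"]),
   ("channel_preference", ["channel_settings"]),
   ("digest_cadence", ["channel_settings"]),
   ("preference_center", ["unsubscribe_flow", "preference_persistence", "channel_settings", "audit_trail"]),
   ("mute_setting", ["preference_persistence", "denied_channel_tests"])]

-- _RANK = {category: index for index, category in enumerate(_CATEGORY_ORDER)}
def pvRank : List (String × Int) :=
  (PySem.List.enumerate pvCategoryOrder).map (fun p => (p.2, p.1))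

-- `_RANK.__getitem__` as a total key: every element sorted sees is a category name,
-- a key of pvRank, so the `.getD 0` default is never reached.
def detect_missing_safeguards_py_alt (signals : List String) (present_safeguards : List String) : List String :=
  let missing : PySem.Set String :=
    signals.foldl (fun m s => PySem.Set.update m ((pvSignalCategories.lookup s).getD [])) PySem.Set.empty
  let missing := PySem.Set.diff missing present_safeguards
  PySem.List.sorted missing (fun c => (pvRank.lookup c).getD 0) false

-- ===== PRECONDITION & SPEC =====
def Spec_detect_missing_safeguards_py (signals : List String) (present_safeguards : List String) (out : List String) : Prop := out = detect_missing_safeguards_py_alt signals present_safeguards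
instance (signals : List String) (present_safeguards : List String) (out : List String) : Decidable (Spec_detect_missing_safeguards_py signals present_safeguards out) := by unfold Spec_detect_missing_safeguards_py; infer_instance

-- ===== CLAIM (what is proved, stated in full; the proofs are below) =====
def Claim_equal_detect_missing_safeguards_py : Prop := ∀ (signals : List String) (present_safeguards : List String), Dom_detect_missing_safeguards_py signals present_safeguards → Spec_detect_missing_safeguards_py signals present_safeguards (detect_missing_safeguards_py signals present_safeguards)

-- ===== LEMMAS AND PROOFS =====

-- membership in B's accumulated `missing` set
theorem pv_mem_foldl_update {m0 : PySem.Set String} {c : String} (signals : List String) :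
    c ∈ signals.foldl (fun m s => PySem.Set.update m ((pvSignalCategories.lookup s).getD [])) m0 ↔
      c ∈ m0 ∨ ∃ s ∈ signals, c ∈ (pvSignalCategories.lookup s).getD [] := by
  induction signals generalizing m0 with
  | nil => simp
  | cons x t ih => simp [List.foldl_cons, ih, PySem.Set.mem_update, or_assoc]

-- what the map yields for an arbitrary signal string
theorem pv_mem_catsOf (s c : String) :
    c ∈ (pvSignalCategories.lookup s).getD [] ↔
      ((s = "unsubscribe" ∨ s = "subscription") ∧
        c ∈ ["unsubscribe_flow", "preference_persistence", "default_state", "denied_channel_tests"]) ∨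
      ((s = "channel_preference" ∨ s = "digest_cadence") ∧ c ∈ ["channel_settings"]) ∨
      (s = "preference_center" ∧ c ∈ ["unsubscribe_flow", "preference_persistence", "channel_settings", "audit_trail"]) ∨
      (s = "mute_setting" ∧ c ∈ ["preference_persistence", "denied_channel_tests"]) := by
  simp only [pvSignalCategories, List.lookup]
  cases h1 : s == "unsubscribe" <;> cases h2 : s == "subscription" <;>
    cases h3 : s == "channel_preference" <;> cases h4 : s == "digest_cadence" <;>
    cases h5 : s == "preference_center" <;> cases h6 : s == "mute_setting" <;>
    simp_all

-- the fold over the signals, phrased through the six trigger memberships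
theorem pv_exists_iff (signals : List String) (c : String) :
    (∃ s ∈ signals, c ∈ (pvSignalCategories.lookup s).getD []) ↔
      (("unsubscribe" ∈ signals ∨ "subscription" ∈ signals) ∧
        c ∈ ["unsubscribe_flow", "preference_persistence", "default_state", "denied_channel_tests"]) ∨
      (("channel_preference" ∈ signals ∨ "digest_cadence" ∈ signals) ∧ c ∈ ["channel_settings"]) ∨
      ("preference_center" ∈ signals ∧ c ∈ ["unsubscribe_flow", "preference_persistence", "channel_settings", "audit_trail"]) ∨
      ("mute_setting" ∈ signals ∧ c ∈ ["preference_persistence", "denied_channel_tests"]) := by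
  simp only [pv_mem_catsOf]
  constructor
  · rintro ⟨s, hs, h⟩
    rcases h with ⟨hs' | hs', hc⟩ | ⟨hs' | hs', hc⟩ | ⟨hs', hc⟩ | ⟨hs', hc⟩ <;> subst hs' <;> tauto
  · rintro (⟨hs | hs, hc⟩ | ⟨hs | hs, hc⟩ | ⟨hs, hc⟩ | ⟨hs, hc⟩)
    exacts [⟨_, hs, by tauto⟩, ⟨_, hs, by tauto⟩, ⟨_, hs, by tauto⟩, ⟨_, hs, by tauto⟩,
      ⟨_, hs, by tauto⟩, ⟨_, hs, by tauto⟩]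

theorem pv_nodup_foldl_update {m0 : PySem.Set String} (signals : List String) (h : m0.Nodup) :
    (signals.foldl (fun m s => PySem.Set.update m ((pvSignalCategories.lookup s).getD [])) m0).Nodup := by
  induction signals generalizing m0 with
  | nil => exact h
  | cons x t ih => exact ih (PySem.Set.nodup_update _ _ h)

-- membership in A's accumulated `required` set, phrased through the six trigger memberships
set_option maxHeartbeats 2000000 in
theorem pv_mem_required (signals : List String) (c : String) :
    (c ∈
      (if signals.contains "mute_setting" then
        PySem.Set.update
          (if signals.contains "preference_center" then
            PySem.Set.update
              (if signals.contains "channel_preference" || signals.contains "digest_cadence" then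
                PySem.Set.add
                  (if signals.contains "unsubscribe" || signals.contains "subscription" then
                    PySem.Set.update (PySem.Set.empty : PySem.Set String)
                      ["unsubscribe_flow", "preference_persistence", "default_state", "denied_channel_tests"]
                  else PySem.Set.empty) "channel_settings"
              else
                (if signals.contains "unsubscribe" || signals.contains "subscription" then
                  PySem.Set.update (PySem.Set.empty : PySem.Set String)
                    ["unsubscribe_flow", "preference_persistence", "default_state", "denied_channel_tests"]
                else PySem.Set.empty))
              ["unsubscribe_flow", "preference_persistence", "channel_settings", "audit_trail"]
          else
            (if signals.contains "channel_preference" || signals.contains "digest_cadence" then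
              PySem.Set.add
                (if signals.contains "unsubscribe" || signals.contains "subscription" then
                  PySem.Set.update (PySem.Set.empty : PySem.Set String)
                    ["unsubscribe_flow", "preference_persistence", "default_state", "denied_channel_tests"]
                else PySem.Set.empty) "channel_settings"
            else
              (if signals.contains "unsubscribe" || signals.contains "subscription" then
                PySem.Set.update (PySem.Set.empty : PySem.Set String)
                  ["unsubscribe_flow", "preference_persistence", "default_state", "denied_channel_tests"]
              else PySem.Set.empty)))
          ["preference_persistence", "denied_channel_tests"]
      else
        (if signals.contains "preference_center" then
          PySem.Set.update
            (if signals.contains "channel_preference" || signals.contains "digest_cadence" then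
              PySem.Set.add
                (if signals.contains "unsubscribe" || signals.contains "subscription" then
                  PySem.Set.update (PySem.Set.empty : PySem.Set String)
                    ["unsubscribe_flow", "preference_persistence", "default_state", "denied_channel_tests"]
                else PySem.Set.empty) "channel_settings"
            else
              (if signals.contains "unsubscribe" || signals.contains "subscription" then
                PySem.Set.update (PySem.Set.empty : PySem.Set String)
                  ["unsubscribe_flow", "preference_persistence", "default_state", "denied_channel_tests"]
              else PySem.Set.empty))
            ["unsubscribe_flow", "preference_persistence", "channel_settings", "audit_trail"]
        else
          (if signals.contains "channel_preference" || signals.contains "digest_cadence" then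
            PySem.Set.add
              (if signals.contains "unsubscribe" || signals.contains "subscription" then
                PySem.Set.update (PySem.Set.empty : PySem.Set String)
                  ["unsubscribe_flow", "preference_persistence", "default_state", "denied_channel_tests"]
              else PySem.Set.empty) "channel_settings"
          else
            (if signals.contains "unsubscribe" || signals.contains "subscription" then
              PySem.Set.update (PySem.Set.empty : PySem.Set String)
                ["unsubscribe_flow", "preference_persistence", "default_state", "denied_channel_tests"]
            else PySem.Set.empty))))) ↔
      (("unsubscribe" ∈ signals ∨ "subscription" ∈ signals) ∧
        c ∈ ["unsubscribe_flow", "preference_persistence", "default_state", "denied_channel_tests"]) ∨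
      (("channel_preference" ∈ signals ∨ "digest_cadence" ∈ signals) ∧ c ∈ ["channel_settings"]) ∨
      ("preference_center" ∈ signals ∧ c ∈ ["unsubscribe_flow", "preference_persistence", "channel_settings", "audit_trail"]) ∨
      ("mute_setting" ∈ signals ∧ c ∈ ["preference_persistence", "denied_channel_tests"]) := by
  split_ifs with h1 h2 h3 h4 <;>
    simp_all [PySem.Set.empty] <;> tauto

-- every triggered category is a category name
theorem pv_flag_mem_order (signals : List String) (c : String)
    (h : (("unsubscribe" ∈ signals ∨ "subscription" ∈ signals) ∧
        c ∈ ["unsubscribe_flow", "preference_persistence", "default_state", "denied_channel_tests"]) ∨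
      (("channel_preference" ∈ signals ∨ "digest_cadence" ∈ signals) ∧ c ∈ ["channel_settings"]) ∨
      ("preference_center" ∈ signals ∧ c ∈ ["unsubscribe_flow", "preference_persistence", "channel_settings", "audit_trail"]) ∨
      ("mute_setting" ∈ signals ∧ c ∈ ["preference_persistence", "denied_channel_tests"])) :
    c ∈ pvCategoryOrder := by
  rcases h with ⟨_, hc⟩ | ⟨_, hc⟩ | ⟨_, hc⟩ | ⟨_, hc⟩ <;> simp_all [pvCategoryOrder] <;> tauto

-- ===== VERDICT (by name: the statement is the Claim_ definition above) =====
set_option maxHeartbeats 1000000 in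
theorem detect_missing_safeguards_py_spec : Claim_equal_detect_missing_safeguards_py := by
  intro signals present_safeguards _
  unfold Spec_detect_missing_safeguards_py detect_missing_safeguards_py detect_missing_safeguards_py_alt
  simp only
  apply Eq.symm
  apply PySem.List.sorted_eq_of_perm_of_pairwise_lt
  · -- permutation: same members, both nodup
    rw [List.perm_ext_iff_of_nodup]
    · intro c
      rw [PySem.Set.mem_diff, pv_mem_foldl_update, pv_exists_iff]
      simp only [List.mem_filter, PySem.Set.contains_iff]
      rw [PySem.Set.mem_diff, PySem.Set.mem_ofList, pv_mem_required]
      have hempty : c ∉ (PySem.Set.empty : PySem.Set String) := List.not_mem_nil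
      constructor
      · rintro ⟨_, hf, hp⟩
        exact ⟨Or.inr hf, hp⟩
      · rintro ⟨hf | hf, hp⟩
        · exact absurd hf hempty
        · exact ⟨pv_flag_mem_order signals c hf, hf, hp⟩
    · exact List.Nodup.filter _ (by decide)
    · exact PySem.Set.nodup_diff _ _ (pv_nodup_foldl_update signals List.nodup_nil)
  · -- strictly increasing rank along the filtered canonical order
    apply List.Pairwise.sublist List.filter_sublist
    decide
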